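-- pv_equiv track=rewrite | github.com/33-66/Time-Converter | toy-problems.py | solve
-- ===== SOURCE A (Python) =====
-- def solve(word):
--     # so we group the vowels using set
--     vowels = set("aeiou")
--     # to keep truck of the  sum of consonantswe  set a variable
--     max_sum = 0
--
--     # Iterate over the consonant substrings
--     for i in range(len(word)):
--         # first loop ,loops over each character in the word checking if its a vowel then loops to the nxt if its a vowel
--         if word[i] in vowels:
--             continue
--         # if its a consonant it will continue to the next loop
--         sum = 0
--         # sum accumulates the sum of the consonants
--         for j in range(i, len(word)):
--             if word[j] not in vowels:
--                 # using ord() we add the consonants  and break when  a  vowel is encountered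
--                 # the ord() used to change alphabetical characters to integers  rep
--                 # Therefore when u change like b which is 2 -1 = 1 so we add 1  to get actual position
--                 sum += ord(word[j]) - ord("a") + 1
--             else:
--                 break
--             # Then we update  the max_sum
--         max_sum = max(max_sum, sum)
--
--     return max_sum
-- ===== SOURCE B (Python) =====
-- def solve(word):
--     # Single reverse pass: running suffix-sum of consonant values, reset at vowels; track max.
--     vowels = set("aeiou")
--     best = 0
--     run = 0
--     for ch in reversed(word):
--         if ch in vowels:
--             run = 0
--         else:
--             run += ord(ch) - ord("a") + 1
--             if run > best:
--                 best = run
--     return best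
-- ===== Notes on version B (the rewrite author's own statement) =====
-- stated objective: faster
-- what changed: Replaces the nested loops (restarting a consonant-run sum at every consonant index) with a single reverse pass keeping a running suffix sum that resets at vowels, tracking the maximum.
import Mathlib
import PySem

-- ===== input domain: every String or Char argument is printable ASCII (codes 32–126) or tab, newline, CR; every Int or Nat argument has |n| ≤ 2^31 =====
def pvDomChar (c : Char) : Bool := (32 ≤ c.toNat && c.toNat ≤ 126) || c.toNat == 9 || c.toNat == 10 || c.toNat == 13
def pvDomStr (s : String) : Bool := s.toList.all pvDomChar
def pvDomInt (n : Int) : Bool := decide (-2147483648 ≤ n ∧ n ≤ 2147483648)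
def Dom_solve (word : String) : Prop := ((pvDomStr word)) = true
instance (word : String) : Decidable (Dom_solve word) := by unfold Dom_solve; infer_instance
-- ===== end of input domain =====

-- B replaces A's quadratic nested loops with one O(n) reverse pass (running suffix sum reset at vowels, track max).

-- vowels = set("aeiou"); membership test shared by both ports
def pvIsVowel (c : Char) : Bool := (PySem.Set.ofList "aeiou".toList).contains c

-- consonant value: ord(c) - ord('a') + 1
def pvVal (c : Char) : Int := (c.toNat : Int) - ('a'.toNat : Int) + 1

-- ===== PORT A =====
-- inner loop: for j in range(i, len(word)): add value while consonant, break at vowel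
def pvInnerSum : List Char → Int
  | [] => 0
  | c :: rest => if pvIsVowel c then 0 else pvVal c + pvInnerSum rest

-- outer loop: for i in range(len(word)): skip vowels; else max_sum = max(max_sum, sum from i)
def pvOuter : List Char → Int → Int
  | [], max_sum => max_sum
  | c :: rest, max_sum =>
      if pvIsVowel c then pvOuter rest max_sum
      else pvOuter rest (max max_sum (pvInnerSum (c :: rest)))

def solve (word : String) : Int := pvOuter word.toList 0

-- ===== PORT B =====
-- one step of the reverse pass: state (run, best)
def pvStep (s : Int × Int) (c : Char) : Int × Int :=
  if pvIsVowel c then (0, s.2)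
  else (s.1 + pvVal c, if s.2 < s.1 + pvVal c then s.1 + pvVal c else s.2)

def solve_alt (word : String) : Int :=
  (word.toList.reverse.foldl pvStep (0, 0)).2

-- ===== PRECONDITION & SPEC =====
def Spec_solve (word : String) (out : Int) : Prop := out = solve_alt word
instance (word : String) (out : Int) : Decidable (Spec_solve word out) := by unfold Spec_solve; infer_instance

-- ===== CLAIM (what is proved, stated in full; the proofs are below) =====
def Claim_equal_solve : Prop := ∀ (word : String), Dom_solve word → Spec_solve word (solve word)

-- ===== LEMMAS AND PROOFS =====

-- proof-side name for B's foldr state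
def pvB (l : List Char) : Int × Int := l.foldr (fun c s => pvStep s c) (0, 0)

theorem pvB_cons (c : Char) (rest : List Char) : pvB (c :: rest) = pvStep (pvB rest) c := rfl

-- the reverse foldl is a foldr over the original list
theorem pvFoldl_rev (l : List Char) :
    l.reverse.foldl pvStep (0, 0) = pvB l := by
  simp [pvB, List.foldl_reverse]

-- first component of B's state = A's inner-loop sum
theorem pvFst_eq (l : List Char) : (pvB l).1 = pvInnerSum l := by
  induction l with
  | nil => rfl
  | cons c rest ih =>
      rw [pvB_cons]
      by_cases h : pvIsVowel c = true
      · simp [pvStep, pvInnerSum, if_pos h]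
      · simp only [pvStep, pvInnerSum, if_neg h]
        rw [ih]; omega

-- B's best component is nonnegative
theorem pvSnd_nonneg (l : List Char) : 0 ≤ (pvB l).2 := by
  induction l with
  | nil => simp [pvB]
  | cons c rest ih =>
      rw [pvB_cons]
      by_cases h : pvIsVowel c = true
      · simpa [pvStep, if_pos h] using ih
      · simp only [pvStep, if_neg h]
        split_ifs with h2 <;> omega

-- A's outer loop with accumulator m equals max m (B's best)
theorem pvOuter_eq (l : List Char) (m : Int) (hm : 0 ≤ m) :
    pvOuter l m = max m (pvB l).2 := by
  induction l generalizing m with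
  | nil => simp [pvOuter, pvB]; omega
  | cons c rest ih =>
      rw [pvB_cons]
      have hf := pvFst_eq rest
      have hn := pvSnd_nonneg rest
      by_cases h : pvIsVowel c = true
      · simp only [pvOuter, pvStep, if_pos h]
        exact ih m hm
      · simp only [pvOuter, pvStep, if_neg h]
        rw [ih _ (le_max_of_le_left hm)]
        simp only [pvInnerSum, if_neg h]
        rw [hf]
        split_ifs with h2 <;> omega

-- ===== VERDICT (by name: the statement is the Claim_ definition above) =====
theorem solve_spec : Claim_equal_solve := by
  intro word _
  unfold Spec_solve solve solve_alt
  rw [pvFoldl_rev, pvOuter_eq word.toList 0 le_rfl]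
  have := pvSnd_nonneg word.toList
  omega
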